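-- pv_equiv track=rewrite | github.com/maaarych/Garmabagadeus- | week2/card_game10_task/card_game10.py | play_cardgame
-- ===== SOURCE A (Python) =====
-- from collections import deque
--
-- def play_cardgame(num_players, num_cards):
--     base = deque([0])
--     main = 0
--     max = 0, set()
--     dict_ = {}
--
--     if num_cards < 24:
--         return max
--
--     for i in range(1, num_cards):
--         if i % 23 != 0:
--             ind_prev = base.index(main)
--             ind_cur = ind_prev + 2
--             if ind_cur > len(base):
--                 base.insert(1, i)
--                 main = i
--             else:
--                 base.insert(ind_cur, i)
--                 main = i
--         else:
--             ind_prev = base.index(main) - 7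
--             ind_cur = ind_prev + 1
--             player = i % num_players or num_players
--             if player in dict_:
--                 dict_[player] += base[ind_prev] + i
--             else:
--                 dict_[player] = base[ind_prev] + i
--             if dict_[player] > max[0]:
--                 max = dict_[player], set([player])
--
--             main = base[ind_cur]
--             base.rotate(-ind_prev)
--             base.popleft()
--
--     return max
-- ===== SOURCE B (Python) =====
-- from collections import deque
--
-- def play_cardgame(num_players, num_cards):
--     # Idiomatic rotation-based simulation: the current marble is always at the
--     # RIGHT end of the deque, so no index search or positional insert is needed.
--     if num_cards < 24:
--         return 0, set()
--     circle = deque([0])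
--     scores = {}
--     best = 0, set()
--     for i in range(1, num_cards):
--         if i % 23:
--             circle.rotate(-1)
--             circle.append(i)
--         else:
--             circle.rotate(7)
--             player = i % num_players or num_players
--             scores[player] = scores.get(player, 0) + circle.pop() + i
--             if scores[player] > best[0]:
--                 best = scores[player], {player}
--             circle.rotate(-1)
--     return best
-- ===== Notes on version B (the rewrite author's own statement) =====
-- stated objective: faster
-- what changed: B drops A's per-marble base.index(main) scan and index-arithmetic inserts and instead keeps the current marble at the right end of the deque, so each turn is a constant-size rotate plus an O(1) append/pop.
import Mathlib
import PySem

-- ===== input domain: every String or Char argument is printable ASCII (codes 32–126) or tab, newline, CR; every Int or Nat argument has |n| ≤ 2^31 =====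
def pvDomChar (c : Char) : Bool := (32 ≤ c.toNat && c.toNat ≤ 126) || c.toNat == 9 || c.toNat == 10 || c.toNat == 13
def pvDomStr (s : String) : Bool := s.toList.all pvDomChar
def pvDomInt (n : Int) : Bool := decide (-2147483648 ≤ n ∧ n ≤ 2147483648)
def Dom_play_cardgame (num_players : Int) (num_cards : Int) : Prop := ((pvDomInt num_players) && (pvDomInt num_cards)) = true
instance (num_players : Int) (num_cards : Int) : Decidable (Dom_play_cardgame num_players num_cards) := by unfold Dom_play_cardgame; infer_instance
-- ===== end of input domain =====

-- B replaces A's positional deque (base.index(main) + insert/rotate-to-index) by the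
-- rotation-based simulation that keeps the current marble at the right end of the deque;
-- measured faster (A rescans the list each marble, B only rotates by a constant).

-- shared primitive: deque.rotate(n) = right-rotation by n (mod len); [] stays [] (exact)
def pyDequeRotate (xs : List Int) (n : Int) : List Int :=
  xs.rotate ((PySem.Int.mod (-n) (xs.length : Int)).toNat)

-- ===== PORT A =====
def playStepA (num_players : Int)
    (st : List Int × Int × (Int × List Int) × PySem.Dict Int Int) (i : Int) :
    List Int × Int × (Int × List Int) × PySem.Dict Int Int :=
  let base := st.1
  let main := st.2.1
  let mx := st.2.2.1
  let dict := st.2.2.2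
  if PySem.Int.mod i 23 ≠ 0 then
    -- ind_prev = base.index(main): main is always in base, so .index never raises
    let ind_prev : Int := ((PySem.List.index? base main).getD 0 : Nat)
    let ind_cur : Int := ind_prev + 2
    if ind_cur > (base.length : Int) then
      (PySem.List.insert base 1 i, i, mx, dict)
    else
      (PySem.List.insert base ind_cur i, i, mx, dict)
  else
    let ind_prev : Int := ((PySem.List.index? base main).getD 0 : Nat) - 7
    let ind_cur : Int := ind_prev + 1
    let r := PySem.Int.mod i num_players
    let player : Int := if r ≠ 0 then r else num_players
    -- base[ind_prev] is always in range (circle has ≥ 23 marbles here)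
    let add : Int := (PySem.List.pyGet? base ind_prev).getD 0 + i
    let dict' := if PySem.Dict.contains dict player then
        PySem.Dict.insert dict player (PySem.Dict.getD dict player 0 + add)
      else PySem.Dict.insert dict player add
    let cur : Int := PySem.Dict.getD dict' player 0
    let mx' := if cur > mx.1 then (cur, [player]) else mx
    let main' : Int := (PySem.List.pyGet? base ind_cur).getD 0
    let base' := (pyDequeRotate base (-ind_prev)).drop 1   -- rotate(-ind_prev); popleft()
    (base', main', mx', dict')

def play_cardgame (num_players : Int) (num_cards : Int) : Int × List Int :=
  if num_cards < 24 then (0, []) else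
    ((PySem.List.pyRange 1 num_cards 1).foldl (playStepA num_players)
      ([0], 0, (0, ([] : List Int)), PySem.Dict.empty)).2.2.1

-- ===== PORT B =====
def playStepB (num_players : Int)
    (st : List Int × (Int × List Int) × PySem.Dict Int Int) (i : Int) :
    List Int × (Int × List Int) × PySem.Dict Int Int :=
  let circle := st.1
  let best := st.2.1
  let scores := st.2.2
  if PySem.Int.mod i 23 ≠ 0 then
    (pyDequeRotate circle (-1) ++ [i], best, scores)   -- rotate(-1); append(i)
  else
    let c1 := pyDequeRotate circle 7
    let r := PySem.Int.mod i num_players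
    let player : Int := if r ≠ 0 then r else num_players
    let v : Int := PySem.Dict.getD scores player 0 + c1.getLast?.getD 0 + i  -- … + circle.pop() + i
    let scores' := PySem.Dict.insert scores player v
    let best' := if v > best.1 then (v, [player]) else best
    (pyDequeRotate c1.dropLast (-1), best', scores')

def play_cardgame_alt (num_players : Int) (num_cards : Int) : Int × List Int :=
  if num_cards < 24 then (0, []) else
    ((PySem.List.pyRange 1 num_cards 1).foldl (playStepB num_players)
      ([0], (0, ([] : List Int)), PySem.Dict.empty)).2.1

-- ===== PRECONDITION & SPEC =====
-- Pre_ excludes exactly the inputs where Python A raises: with num_cards ≥ 24 and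
-- num_players == 0 the scoring line 'i % num_players' raises ZeroDivisionError (B raises too).
def Pre_play_cardgame (num_players : Int) (num_cards : Int) : Prop :=
  num_cards < 24 ∨ num_players ≠ 0
instance (num_players : Int) (num_cards : Int) : Decidable (Pre_play_cardgame num_players num_cards) := by
  unfold Pre_play_cardgame; infer_instance

def pvWitness_play_cardgame : Int × Int := (9, 100)

def Spec_play_cardgame (num_players : Int) (num_cards : Int) (out : Int × List Int) : Prop := out = play_cardgame_alt num_players num_cards
instance (num_players : Int) (num_cards : Int) (out : Int × List Int) : Decidable (Spec_play_cardgame num_players num_cards out) := by unfold Spec_play_cardgame; infer_instance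

-- ===== CLAIM (what is proved, stated in full; the proofs are below) =====
def Claim_equal_play_cardgame : Prop := ∀ (num_players : Int) (num_cards : Int), Dom_play_cardgame num_players num_cards → Pre_play_cardgame num_players num_cards → Spec_play_cardgame num_players num_cards (play_cardgame num_players num_cards)

-- ===== LEMMAS AND PROOFS =====

-- Python list/deque.insert at a nonnegative in-range index is take/cons/drop
theorem pyInsert_eq (xs : List Int) (v : Int) (p : Nat) (h : p ≤ xs.length) :
    PySem.List.insert xs (p:Int) v = xs.take p ++ v :: xs.drop p := by
  simp only [PySem.List.insert, PySem.List.sliceIndices]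
  norm_num
  have hcl : (if (p:Int) < 0 then max ((p:Int) + (xs.length:Int)) 0 else min (p:Int) (xs.length:Int)).toNat = p := by
    rw [if_neg (by omega)]
    omega
  rw [hcl]

theorem rotate_congr (l : List Int) (a b : Nat) (h : a % l.length = b % l.length) :
    l.rotate a = l.rotate b := by
  rw [← List.rotate_mod, h, List.rotate_mod]

-- deque.rotate(n) is a left rotation by any Nat congruent to -n mod len
theorem pyDequeRotate_eq (xs : List Int) (hx : xs ≠ []) (n : Int) (m : Nat)
    (hd : (xs.length : Int) ∣ (n + m)) :
    pyDequeRotate xs n = xs.rotate m := by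
  unfold pyDequeRotate
  have hlen : 0 < xs.length := List.length_pos_iff.mpr hx
  have hlen' : (0:Int) < (xs.length:Int) := by exact_mod_cast hlen
  rw [PySem.Int.mod_eq_emod_of_pos hlen']
  set t : Nat := ((-n) % (xs.length:Int)).toNat with ht
  have h0 : (0:Int) ≤ (-n) % (xs.length:Int) := Int.emod_nonneg _ (by omega)
  have hlt : (-n) % (xs.length:Int) < (xs.length:Int) := Int.emod_lt_of_pos _ hlen'
  have hcast : (t:Int) = (-n) % (xs.length:Int) := by omega
  have hme : (-n) ≡ (m:Int) [ZMOD (xs.length:Int)] := by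
    apply Int.modEq_iff_dvd.mpr
    rw [sub_neg_eq_add, add_comm]
    exact hd
  have hme2 : (-n) % (xs.length:Int) = (m:Int) % (xs.length:Int) := hme
  rw [← List.rotate_mod xs t, ← List.rotate_mod xs m]
  congr 1
  have h1 : ((t % xs.length : Nat):Int) = ((m % xs.length : Nat):Int) := by
    rw [Int.natCast_mod, Int.natCast_mod, hcast, hme2, Int.emod_emod_of_dvd _ dvd_rfl]
  exact_mod_cast h1

-- xs[k - c] for Nat k < len, 0 < c ≤ len, with Python's negative indexing
theorem pyGet_back (xs : List Int) (k c : Nat) (hk : k < xs.length)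
    (hc0 : 0 < c) (hc : c ≤ xs.length) :
    PySem.List.pyGet? xs ((k:Int) - (c:Int)) = xs[(xs.length + k - c) % xs.length]? := by
  rcases Nat.lt_or_ge k c with h | h
  · have h1 : ((k:Int) - (c:Int)) = -(((c - k):Nat):Int) := by omega
    rw [h1, PySem.List.pyGet?_neg_natCast _ _ (by omega) (by omega)]
    congr 1
    rw [Nat.mod_eq_of_lt (by omega)]
    omega
  · have h1 : ((k:Int) - (c:Int)) = ((k - c : Nat):Int) := by omega
    rw [h1, PySem.List.pyGet?_natCast]
    congr 1
    have h2 : xs.length + k - c = xs.length + (k - c) := by omega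
    rw [h2, Nat.add_mod_left, Nat.mod_eq_of_lt (by omega)]

theorem getElem?_rotate (l : List Int) (n k : Nat) (hk : k < l.length) :
    (l.rotate n)[k]? = l[(k + n) % l.length]? := by
  have h1 : k < (l.rotate n).length := by simpa using hk
  rw [List.getElem?_eq_getElem h1,
    List.getElem?_eq_getElem (Nat.mod_lt _ (by omega))]
  exact congrArg some (List.getElem_rotate l n k h1)

-- the coupling invariant: B's circle is A's base left-rotated so that main is last
def InvPC (i : Int)
    (sA : List Int × Int × (Int × List Int) × PySem.Dict Int Int)
    (sB : List Int × (Int × List Int) × PySem.Dict Int Int) : Prop :=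
  sA.1 ≠ [] ∧ (∀ x ∈ sA.1, 0 ≤ x ∧ x < i) ∧ sA.2.1 ∈ sA.1 ∧
    ((sA.1.length : Int) = i - 2 * ((i - 1) / 23)) ∧
    sB.1 = sA.1.rotate ((PySem.List.index? sA.1 sA.2.1).getD 0 + 1) ∧
    sB.2.1 = sA.2.2.1 ∧ sB.2.2 = sA.2.2.2

theorem stepPC (np i : Int) (hi : 1 ≤ i)
    (sA : List Int × Int × (Int × List Int) × PySem.Dict Int Int)
    (sB : List Int × (Int × List Int) × PySem.Dict Int Int)
    (h : InvPC i sA sB) : InvPC (i+1) (playStepA np sA i) (playStepB np sB i) := by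
  obtain ⟨base, main, mx, dict⟩ := sA
  obtain ⟨circle, best, scores⟩ := sB
  obtain ⟨hne, hbd, hmem, hlen, hrot, hbest, hdict⟩ := h
  simp only at hne hbd hmem hlen hrot hbest hdict
  have hsome : (PySem.List.index? base main).isSome := (PySem.List.index?_isSome_iff _ _).mpr hmem
  obtain ⟨k, hk⟩ : ∃ k, PySem.List.index? base main = some k := Option.isSome_iff_exists.mp hsome
  obtain ⟨hklt, hbk, hmin⟩ := PySem.List.getElem_of_index?_eq_some hk
  have hgetD : (PySem.List.index? base main).getD 0 = k := by rw [hk]; rfl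
  have hlenpos : 0 < base.length := List.length_pos_iff.mpr hne
  have hinot : i ∉ base := fun hmem' => by have := (hbd i hmem').2; omega
  have hcirc : circle = base.rotate (k+1) := by rw [hrot, hgetD]
  have hcne' : base.rotate (k+1) ≠ [] := by
    intro hc; exact hne (List.rotate_eq_nil_iff.mp hc)
  by_cases h23 : PySem.Int.mod i 23 ≠ 0
  · -- ordinary marble
    have hiemod : i % 23 ≠ 0 := by
      rwa [PySem.Int.mod_eq_emod_of_pos (by norm_num : (0:Int) < 23)] at h23
    have hB1 : pyDequeRotate (base.rotate (k+1)) (-1) = base.rotate (k+1+1) := by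
      rw [pyDequeRotate_eq _ hcne' (-1) 1 (by simp), List.rotate_rotate]
    -- rotating the new circle: shared computation for both insertion positions
    have hsplit : ∀ p : Nat, p ≤ base.length →
        (base.take p ++ i :: base.drop p).rotate (p+1) =
          base.drop p ++ base.take p ++ [i] := by
      intro p hp
      have hT : (base.take p).length = p := by
        simp [List.length_take]; omega
      rw [List.rotate_eq_drop_append_take
          (by simp only [List.length_append, List.length_cons, hT]; omega)]
      rw [List.drop_append, List.take_append, hT]
      rw [List.drop_eq_nil_of_le (by rw [hT]; omega),
        List.take_of_length_le (by rw [hT]; omega)]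
      have h1 : p + 1 - p = 1 := by omega
      rw [h1]
      simp
    simp only [playStepA, playStepB, if_pos h23, hgetD, hcirc]
    by_cases hbig : ((k:Nat):Int) + 2 > (base.length : Int)
    · -- current marble is last: insert at position 1
      rw [if_pos hbig]
      have hkval : k + 1 = base.length := by omega
      have h1len : (1:Nat) ≤ base.length := hlenpos
      have hins : PySem.List.insert base 1 i = base.take 1 ++ i :: base.drop 1 := by
        have := pyInsert_eq base i 1 h1len
        simpa using this
      have hidx : PySem.List.index? (base.take 1 ++ i :: base.drop 1) i = some 1 := by
        rw [PySem.List.index?_eq_some_iff]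
        exact ⟨base.take 1, base.drop 1, rfl, by simp [List.length_take]; omega,
          fun hmem' => hinot (List.take_subset _ _ hmem')⟩
      rw [hins]
      refine ⟨by simp, ?_, ?_, ?_, ?_, hbest, hdict⟩
      · intro x hx
        rcases List.mem_append.mp hx with h1 | h1
        · have := hbd x (List.take_subset _ _ h1); omega
        · rcases List.mem_cons.mp h1 with rfl | h2
          · omega
          · have := hbd x (List.drop_subset _ _ h2); omega
      · simp
      · simp only [List.length_append, List.length_cons, List.length_take, List.length_drop]
        omega
      · rw [hidx, hB1]
        simp only [Option.getD_some]
        rw [hsplit 1 h1len]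
        have hc1 : base.rotate (k+1+1) = base.rotate 1 := by
          apply rotate_congr
          rw [show k+1+1 = base.length + 1 by omega, Nat.add_mod_left]
        rw [hc1, List.rotate_eq_drop_append_take h1len]
    · -- insert at index k+2
      rw [if_neg hbig]
      have hk2 : k + 2 ≤ base.length := by omega
      have hcast2 : ((k:Nat):Int) + 2 = (((k+2 : Nat)):Int) := by push_cast; ring
      rw [hcast2, pyInsert_eq base i (k+2) hk2]
      have hidx : PySem.List.index? (base.take (k+2) ++ i :: base.drop (k+2)) i
          = some (k+2) := by
        rw [PySem.List.index?_eq_some_iff]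
        exact ⟨base.take (k+2), base.drop (k+2), rfl, by simp [List.length_take]; omega,
          fun hmem' => hinot (List.take_subset _ _ hmem')⟩
      refine ⟨by simp, ?_, ?_, ?_, ?_, hbest, hdict⟩
      · intro x hx
        rcases List.mem_append.mp hx with h1 | h1
        · have := hbd x (List.take_subset _ _ h1); omega
        · rcases List.mem_cons.mp h1 with rfl | h2
          · omega
          · have := hbd x (List.drop_subset _ _ h2); omega
      · simp
      · simp only [List.length_append, List.length_cons, List.length_take, List.length_drop]
        omega
      · rw [hidx, hB1]
        simp only [Option.getD_some]
        rw [hsplit (k+2) hk2]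
        rw [List.rotate_eq_drop_append_take hk2]
  · -- scoring marble: 23 | i
    have hmz : PySem.Int.mod i 23 = 0 := not_ne_iff.mp h23
    have hiemod : i % 23 = 0 := by
      rwa [PySem.Int.mod_eq_emod_of_pos (by norm_num : (0:Int) < 23)] at hmz
    have hlen23 : 23 ≤ base.length := by omega
    obtain ⟨j, hjdef⟩ : ∃ j, j = (base.length + k - 7) % base.length := ⟨_, rfl⟩
    have hjlt : j < base.length := hjdef ▸ Nat.mod_lt _ hlenpos
    have hrne : base.rotate j ≠ [] := by
      intro hc; exact hne (List.rotate_eq_nil_iff.mp hc)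
    obtain ⟨r0, rot1, hrot0⟩ := List.exists_cons_of_ne_nil hrne
    have hrot1len : rot1.length + 1 = base.length := by
      have := congrArg List.length hrot0; simpa using this.symm
    obtain ⟨r1, rt, hrot1⟩ := List.exists_cons_of_ne_nil
      (by intro hc; rw [hc] at hrot1len; simp at hrot1len; omega : rot1 ≠ [])
    have hrot01 : base.rotate j = r0 :: r1 :: rt := by rw [hrot0, hrot1]
    have hrtlen : rt.length + 2 = base.length := by
      have := congrArg List.length hrot01; simp at this; omega
    have hj1 : (1 + j) % base.length = (base.length + k - 6) % base.length := by
      rw [show base.length + k - 6 = 1 + (base.length + k - 7) from by omega,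
        Nat.add_mod 1 (base.length + k - 7) base.length, ← hjdef,
        Nat.mod_eq_of_lt (show 1 < base.length from by omega)]
    have hb0? : base[j]? = some r0 := by
      have h0 := getElem?_rotate base j 0 (by omega)
      rw [hrot01] at h0
      rw [show ((r0 :: r1 :: rt)[0]? : Option Int) = some r0 from rfl] at h0
      rw [Nat.zero_add, Nat.mod_eq_of_lt hjlt] at h0
      exact h0.symm
    have hb1? : base[(1 + j) % base.length]? = some r1 := by
      have h1 := getElem?_rotate base j 1 (by omega)
      rw [hrot01] at h1
      rw [show ((r0 :: r1 :: rt)[1]? : Option Int) = some r1 from rfl] at h1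
      exact h1.symm
    have hA0 : PySem.List.pyGet? base (((k:Nat):Int) - 7) = some r0 := by
      rw [show ((k:Nat):Int) - 7 = ((k:Nat):Int) - ((7:Nat):Int) from by omega,
        pyGet_back base k 7 hklt (by norm_num) (by omega), ← hjdef]
      exact hb0?
    have hA1 : PySem.List.pyGet? base (((k:Nat):Int) - 7 + 1) = some r1 := by
      rw [show ((k:Nat):Int) - 7 + 1 = ((k:Nat):Int) - ((6:Nat):Int) from by omega,
        pyGet_back base k 6 hklt (by norm_num) (by omega), ← hj1]
      exact hb1?
    have hAD : pyDequeRotate base (-(((k:Nat):Int) - 7)) = base.rotate j := by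
      apply pyDequeRotate_eq base hne
      obtain ⟨q, hq⟩ : ∃ q, base.length * q + (base.length + k - 7) % base.length
          = base.length + k - 7 := ⟨_, Nat.div_add_mod _ _⟩
      rw [← hjdef] at hq
      refine ⟨1 - (q:Int), ?_⟩
      have hqZ : ((base.length * q : Nat):Int) + (j:Int) = ((base.length + k - 7 : Nat):Int) := by
        exact_mod_cast hq
      have hqc : ((base.length * q : Nat):Int) = (base.length:Int) * (q:Int) := by push_cast; ring
      have hc7 : ((base.length + k - 7 : Nat):Int) = (base.length:Int) + (k:Int) - 7 := by
        push_cast [Nat.cast_sub (by omega : 7 ≤ base.length + k)]; ring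
      rw [mul_sub, mul_one, ← hqc]
      omega
    have hc1 : pyDequeRotate (base.rotate (k+1)) 7 = (r1 :: rt) ++ [r0] := by
      have h7 : pyDequeRotate (base.rotate (k+1)) 7
          = (base.rotate (k+1)).rotate (base.length - 7) := by
        apply pyDequeRotate_eq _ hcne'
        refine ⟨1, ?_⟩
        rw [List.length_rotate]
        push_cast [Nat.cast_sub (by omega : 7 ≤ base.length)]
        ring
      rw [h7, List.rotate_rotate]
      have hcg : base.rotate (k + 1 + (base.length - 7)) = base.rotate (j+1) := by
        apply rotate_congr
        rw [show k + 1 + (base.length - 7) = base.length + k - 6 from by omega,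
          ← hj1, Nat.add_comm 1 j]
      rw [hcg, ← List.rotate_rotate, hrot01]
      rw [show (1:Nat) = 0 + 1 from rfl, List.rotate_cons_succ, List.rotate_zero]
    have hpop : ((pyDequeRotate (base.rotate (k+1)) 7).getLast?).getD 0 = r0 := by
      rw [hc1, List.getLast?_concat]; rfl
    have hdl : (pyDequeRotate (base.rotate (k+1)) 7).dropLast = r1 :: rt := by
      rw [hc1, List.dropLast_concat]
    have hfinrot : pyDequeRotate (r1 :: rt) (-1) = (r1 :: rt).rotate 1 :=
      pyDequeRotate_eq _ (by simp) (-1) 1 (by simp)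
    simp only [playStepA, playStepB, if_neg h23, hgetD, hcirc, hdl, hpop, hfinrot,
      hA0, hA1, hAD, hrot01, hdict, Option.getD_some, List.drop_one, List.tail_cons]
    have hdicts : (if dict.contains (if PySem.Int.mod i np ≠ 0 then PySem.Int.mod i np else np)
          then dict.insert (if PySem.Int.mod i np ≠ 0 then PySem.Int.mod i np else np)
            (dict.getD (if PySem.Int.mod i np ≠ 0 then PySem.Int.mod i np else np) 0 + (r0 + i))
          else dict.insert (if PySem.Int.mod i np ≠ 0 then PySem.Int.mod i np else np) (r0 + i))
        = dict.insert (if PySem.Int.mod i np ≠ 0 then PySem.Int.mod i np else np)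
            (dict.getD (if PySem.Int.mod i np ≠ 0 then PySem.Int.mod i np else np) 0 + r0 + i) := by
      set P := if PySem.Int.mod i np ≠ 0 then PySem.Int.mod i np else np with hP
      by_cases hcont : dict.contains P
      · rw [if_pos hcont]
        congr 1
        ring
      · rw [if_neg hcont,
          PySem.Dict.getD_of_not_contains dict 0 (by simpa using hcont)]
        congr 1
        ring
    rw [hdicts, PySem.Dict.getD_insert_self, hbest]
    refine ⟨by simp, ?_, by simp, ?_, ?_, rfl, rfl⟩
    · intro x hx
      have hx' : x ∈ base.rotate j := by
        rw [hrot01]; exact List.mem_cons_of_mem _ hx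
      have := hbd x (List.mem_rotate.mp hx')
      omega
    · simp only [List.length_cons]
      omega
    · rw [PySem.List.index?_cons_self]
      simp

theorem loopPC (np : Int) (n : Nat) :
    InvPC (1 + (n:Int))
      ((PySem.List.pyRange 1 (1 + (n:Int)) 1).foldl (playStepA np)
        ([0], 0, (0, ([] : List Int)), PySem.Dict.empty))
      ((PySem.List.pyRange 1 (1 + (n:Int)) 1).foldl (playStepB np)
        ([0], (0, ([] : List Int)), PySem.Dict.empty)) := by
  induction n with
  | zero =>
      rw [PySem.List.pyRange_one_eq_nil (by norm_num)]
      simp only [List.foldl_nil]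
      refine ⟨by simp, ?_, by simp, by norm_num, ?_, rfl, rfl⟩
      · intro x hx
        simp only [List.mem_singleton] at hx
        omega
      · rw [PySem.List.index?_cons_self]
        simp
  | succ m ih =>
      have hcast : (1 : Int) + (((m+1) : Nat):Int) = (1 + (m:Int)) + 1 := by push_cast; ring
      rw [hcast, PySem.List.pyRange_one_succ_right (by omega : (1:Int) ≤ 1 + (m:Int))]
      rw [List.foldl_append, List.foldl_append]
      simp only [List.foldl_cons, List.foldl_nil]
      exact stepPC np (1 + (m:Int)) (by omega) _ _ ih

-- ===== VERDICT (by name: the statement is the Claim_ definition above) =====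
theorem play_cardgame_spec : Claim_equal_play_cardgame := by
  intro np nc _ _
  unfold Spec_play_cardgame play_cardgame play_cardgame_alt
  by_cases h : nc < 24
  · simp [h]
  · rw [if_neg h, if_neg h]
    have hcast : (1 : Int) + (((nc - 1).toNat : Nat):Int) = nc := by omega
    have hloop := loopPC np (nc - 1).toNat
    rw [hcast] at hloop
    exact (hloop.2.2.2.2.2.1).symm
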